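-- pv_equiv track=rewrite | github.com/sampson-m/hlda | scripts/_archive/penalized_sampling.py | create_children_list
-- ===== SOURCE A (Python) =====
-- def create_children_list(topic_hierarchy, K):
--     """
--     Given a topic_hierarchy dictionary where each value is a full path
--     (list) from the root to a leaf topic, create a dictionary mapping each topic
--     (0,...,K-1) to the set of all nodes that follow it in any path (its full children).
--
--     Parameters:
--       topic_hierarchy (dict): e.g. {7: [0, 1, 3, 7], 8: [0, 1, 3, 8], ...}
--       K (int): total number of topics.
--
--     Returns:
--       children_dict (dict): Dictionary mapping each topic (0,...,K-1) to a list
--                             of its children (transitively). For example, if all paths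
--                             start with 0, then children_dict[0] will be the union of
--                             all other topics.
--     """
--     children_dict = {k: set() for k in range(K)}
--     if topic_hierarchy is not None:
--         for path in topic_hierarchy.values():
--             # For each topic in the path, add all later topics in the same path as children.
--             for i in range(len(path) - 1):
--                 parent = path[i]
--                 for j in range(i+1, len(path)):
--                     child = path[j]
--                     children_dict[parent].add(child)
--     # Convert sets to sorted lists (optional, but helps with reproducibility)
--     for k in range(K):
--         children_dict[k] = sorted(list(children_dict[k]))
--     return children_dict
-- ===== SOURCE B (Python) =====
-- def create_children_list(topic_hierarchy, K):
--     # One backward pass per path with an accumulating suffix set, instead of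
--     # rescanning the tail of the path for every position.
--     children = {k: set() for k in range(K)}
--     if topic_hierarchy is not None:
--         for path in topic_hierarchy.values():
--             if path:
--                 later = {path[-1]}
--                 for node in path[-2::-1]:
--                     children[node] |= later
--                     later.add(node)
--     return {k: sorted(children[k]) for k in range(K)}
-- ===== Notes on version B (the rewrite author's own statement) =====
-- stated objective: alternative
-- what changed: Replaces A's per-position rescan of the path tail (nested i/j loops with element-by-element set.add) by a single backward pass per path that maintains an accumulating suffix set unioned into each node's child set.
import Mathlib
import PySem

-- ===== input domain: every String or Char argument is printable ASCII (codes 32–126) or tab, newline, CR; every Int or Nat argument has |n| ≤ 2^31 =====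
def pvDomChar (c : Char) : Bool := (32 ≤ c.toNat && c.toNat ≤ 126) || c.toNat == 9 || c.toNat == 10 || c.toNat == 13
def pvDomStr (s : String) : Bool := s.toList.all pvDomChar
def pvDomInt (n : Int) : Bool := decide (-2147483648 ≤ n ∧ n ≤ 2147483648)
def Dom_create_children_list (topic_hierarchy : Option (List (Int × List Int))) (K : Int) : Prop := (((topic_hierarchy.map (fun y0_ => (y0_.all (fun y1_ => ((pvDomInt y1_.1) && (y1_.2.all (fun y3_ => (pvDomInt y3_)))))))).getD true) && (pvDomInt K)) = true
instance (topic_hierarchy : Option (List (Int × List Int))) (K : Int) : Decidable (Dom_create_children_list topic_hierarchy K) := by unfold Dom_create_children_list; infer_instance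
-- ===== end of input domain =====

-- B replaces A's quadratic per-path rescanning (for every position, scan the whole tail)
-- by a single backward pass per path with an accumulating suffix set.

-- ===== PORT A =====
-- {k: set() for k in range(K)}
def pvInitDict (K : Int) : PySem.Dict Int (List Int) :=
  (PySem.List.pyRange 0 K).foldl (fun d k => d.insert k PySem.Set.empty) PySem.Dict.empty

-- inner loop 'for j in range(i+1, len(path)): children_dict[parent].add(path[j])'
-- (children_dict[parent] raises KeyError when parent is not a key; Pre_ excludes that,
-- so modify with default [] coincides with Python there)
def pvAInner (d : PySem.Dict Int (List Int)) (parent : Int) (rest : List Int) : PySem.Dict Int (List Int) :=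
  rest.foldl (fun d child => d.modify parent [] (fun s => PySem.Set.add s child)) d

-- outer loop 'for i in range(len(path) - 1)': structural recursion over the suffixes;
-- the extra step at the final one-element suffix has an empty inner loop, i.e. is a no-op,
-- exactly as range(len(path)-1) stopping one earlier.
def pvAPath (d : PySem.Dict Int (List Int)) : List Int → PySem.Dict Int (List Int)
  | [] => d
  | parent :: rest => pvAPath (pvAInner d parent rest) rest

def create_children_list (topic_hierarchy : Option (List (Int × List Int))) (K : Int) : List (Int × List Int) :=
  let children0 := pvInitDict K
  let children :=
    match topic_hierarchy with
    | none => children0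
    | some l => ((PySem.Dict.ofList l).values).foldl pvAPath children0
  -- for k in range(K): children_dict[k] = sorted(list(children_dict[k]))
  ((PySem.List.pyRange 0 K).foldl
      (fun d k => d.insert k (PySem.List.sorted (d.getD k []) (fun x => x))) children).items

-- ===== PORT B =====
-- one step of 'for node in path[-2::-1]: children[node] |= later; later.add(node)'
def pvBStep (st : PySem.Dict Int (List Int) × PySem.Set Int) (node : Int) :
    PySem.Dict Int (List Int) × PySem.Set Int :=
  (st.1.modify node [] (fun s => PySem.Set.union s st.2), PySem.Set.add st.2 node)

-- 'if path: later = {path[-1]}; for node in path[-2::-1]: …'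
def pvBPath (d : PySem.Dict Int (List Int)) (p : List Int) : PySem.Dict Int (List Int) :=
  match p.getLast? with
  | none => d
  | some last => ((p.dropLast.reverse).foldl pvBStep (d, PySem.Set.add PySem.Set.empty last)).1

def create_children_list_alt (topic_hierarchy : Option (List (Int × List Int))) (K : Int) : List (Int × List Int) :=
  let children0 := pvInitDict K
  let children :=
    match topic_hierarchy with
    | none => children0
    | some l => ((PySem.Dict.ofList l).values).foldl pvBPath children0
  -- {k: sorted(children[k]) for k in range(K)}
  ((PySem.List.pyRange 0 K).foldl
      (fun acc k => acc.insert k (PySem.List.sorted (children.getD k []) (fun x => x)))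
      PySem.Dict.empty).items

-- ===== PRECONDITION & SPEC =====
-- Pre_ excludes exactly the inputs where A raises KeyError: a non-final element of some
-- stored path lying outside range(K) (children_dict[parent] with a missing key).
def Pre_create_children_list (topic_hierarchy : Option (List (Int × List Int))) (K : Int) : Prop :=
  ∀ p ∈ topic_hierarchy.getD [], ∀ e ∈ p.2.dropLast, 0 ≤ e ∧ e < K
instance (topic_hierarchy : Option (List (Int × List Int))) (K : Int) : Decidable (Pre_create_children_list topic_hierarchy K) := by unfold Pre_create_children_list; infer_instance

def pvWitness_create_children_list : (Option (List (Int × List Int))) × Int :=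
  (some [(7, [0, 1, 3, 7]), (8, [0, 1, 3, 8])], 9)

def Spec_create_children_list (topic_hierarchy : Option (List (Int × List Int))) (K : Int) (out : List (Int × List Int)) : Prop := out = create_children_list_alt topic_hierarchy K
instance (topic_hierarchy : Option (List (Int × List Int))) (K : Int) (out : List (Int × List Int)) : Decidable (Spec_create_children_list topic_hierarchy K out) := by unfold Spec_create_children_list; infer_instance

-- ===== CLAIM (what is proved, stated in full; the proofs are below) =====
def Claim_equal_create_children_list : Prop := ∀ (topic_hierarchy : Option (List (Int × List Int))) (K : Int), Dom_create_children_list topic_hierarchy K → Pre_create_children_list topic_hierarchy K → Spec_create_children_list topic_hierarchy K (create_children_list topic_hierarchy K)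

-- ===== LEMMAS AND PROOFS =====

-- 'k appears strictly before an occurrence of x in p' — what A's double loop records.
def pvContrib : List Int → Int → Int → Prop
  | [], _, _ => False
  | h :: rest, k, x => (k = h ∧ x ∈ rest) ∨ pvContrib rest k x

-- the same relation read along the reversed list (B's traversal order).
def pvContribR : List Int → Int → Int → Prop
  | [], _, _ => False
  | y :: rest, k, x => (x = y ∧ k ∈ rest) ∨ pvContribR rest k x

theorem pvInit_getD_aux (l : List Int) (d : PySem.Dict Int (List Int))
    (h : ∀ u, d.getD u [] = []) (v : Int) :
    ((l.foldl (fun d k => d.insert k PySem.Set.empty) d).getD v []) = [] := by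
  induction l generalizing d with
  | nil => exact h v
  | cons a t ih =>
      refine ih _ (fun u => ?_)
      by_cases hu : u = a
      · subst hu; simp [PySem.Set.empty, PySem.Dict.getD_insert_self]
      · rw [PySem.Dict.getD_insert_of_ne _ _ _ hu]; exact h u

theorem pvInit_getD (K v : Int) : (pvInitDict K).getD v [] = [] := by
  refine pvInit_getD_aux _ _ (fun u => rfl) v

theorem pvInit_keys (K : Int) : (pvInitDict K).keys = PySem.List.pyRange 0 K := by
  have h := PySem.Dict.keys_foldl_insert (ν := List Int) (PySem.List.pyRange 0 K)
      (fun _ _ => PySem.Set.empty) PySem.Dict.empty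
  have h2 : PySem.Set.update ((PySem.Dict.empty : PySem.Dict Int (List Int)).keys)
      (PySem.List.pyRange 0 K) = PySem.Set.ofList (PySem.List.pyRange 0 K) := by
    rw [PySem.Set.ofList_eq_foldl]; rfl
  rw [pvInitDict]
  rw [h, h2, PySem.Set.ofList_eq_self_of_nodup _ (PySem.List.nodup_pyRange_one 0 K)]

theorem pvSet_update_of_subset (xs : List Int) (s : PySem.Set Int)
    (h : ∀ x ∈ xs, x ∈ s) : PySem.Set.update s xs = s := by
  induction xs generalizing s with
  | nil => rfl
  | cons a t ih =>
      have : PySem.Set.update s (a :: t) = PySem.Set.update (s.add a) t := rfl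
      rw [this, PySem.Set.add_of_mem (h a (by simp))]
      exact ih s (fun x hx => h x (by simp [hx]))

theorem pvKeys_insert (d : PySem.Dict Int (List Int)) (k : Int) (v : List Int) :
    (d.insert k v).keys = PySem.Set.add d.keys k := by
  have h := PySem.Dict.keys_foldl_insert (ν := List Int) [k] (fun _ _ => v) d
  simpa using h

theorem pvKeys_modify_mem (d : PySem.Dict Int (List Int)) (k : Int)
    (f : List Int → List Int) (hk : k ∈ d.keys) :
    (d.modify k [] f).keys = d.keys := by
  rw [PySem.Dict.keys_modify, pvKeys_insert, PySem.Set.add_of_mem hk]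

theorem pvKeys_pvAInner (d : PySem.Dict Int (List Int)) (parent : Int) (rest : List Int)
    (hp : parent ∈ d.keys) : (pvAInner d parent rest).keys = d.keys := by
  induction rest generalizing d with
  | nil => rfl
  | cons c t ih =>
      show (pvAInner (d.modify parent [] (fun s => PySem.Set.add s c)) parent t).keys = d.keys
      rw [ih _ (by rwa [pvKeys_modify_mem d parent _ hp]), pvKeys_modify_mem d parent _ hp]

theorem pvKeys_pvAPath (p : List Int) (d : PySem.Dict Int (List Int))
    (h : ∀ e ∈ p.dropLast, e ∈ d.keys) : (pvAPath d p).keys = d.keys := by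
  induction p generalizing d with
  | nil => rfl
  | cons parent rest ih =>
      show (pvAPath (pvAInner d parent rest) rest).keys = d.keys
      cases rest with
      | nil => rfl
      | cons r t =>
          have hp : parent ∈ d.keys := h parent (by simp [List.dropLast])
          have hk := pvKeys_pvAInner d parent (r :: t) hp
          rw [ih _ (fun e he => by rw [hk]; exact h e (by simp [List.dropLast]; right; exact he)), hk]

theorem pvMem_pvAInner (rest : List Int) (d : PySem.Dict Int (List Int)) (parent k x : Int) :
    x ∈ (pvAInner d parent rest).getD k [] ↔
      x ∈ d.getD k [] ∨ (k = parent ∧ x ∈ rest) := by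
  induction rest generalizing d with
  | nil => simp [pvAInner]
  | cons c t ih =>
      show x ∈ (pvAInner (d.modify parent [] (fun s => PySem.Set.add s c)) parent t).getD k [] ↔ _
      rw [ih]
      by_cases hk : k = parent
      · subst hk
        rw [PySem.Dict.getD_modify_self, PySem.Set.mem_add]
        simp; tauto
      · rw [PySem.Dict.getD_modify_of_ne _ _ _ hk]
        simp [hk]

theorem pvNodup_pvAInner (rest : List Int) (d : PySem.Dict Int (List Int)) (parent : Int)
    (h : ∀ k, ((d.getD k []) : List Int).Nodup) (k : Int) :
    ((pvAInner d parent rest).getD k []).Nodup := by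
  induction rest generalizing d with
  | nil => exact h k
  | cons c t ih =>
      refine ih _ (fun u => ?_)
      by_cases hu : u = parent
      · subst hu
        rw [PySem.Dict.getD_modify_self]
        exact PySem.Set.nodup_add _ _ (h u)
      · rw [PySem.Dict.getD_modify_of_ne _ _ _ hu]; exact h u

theorem pvMem_pvAPath (p : List Int) (d : PySem.Dict Int (List Int)) (k x : Int) :
    x ∈ (pvAPath d p).getD k [] ↔ x ∈ d.getD k [] ∨ pvContrib p k x := by
  induction p generalizing d with
  | nil => simp [pvAPath, pvContrib]
  | cons parent rest ih =>
      show x ∈ (pvAPath (pvAInner d parent rest) rest).getD k [] ↔ _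
      rw [ih, pvMem_pvAInner]
      show _ ↔ _ ∨ ((k = parent ∧ x ∈ rest) ∨ pvContrib rest k x)
      tauto

theorem pvNodup_pvAPath (p : List Int) (d : PySem.Dict Int (List Int))
    (h : ∀ k, ((d.getD k []) : List Int).Nodup) (k : Int) :
    ((pvAPath d p).getD k []).Nodup := by
  induction p generalizing d with
  | nil => exact h k
  | cons parent rest ih => exact ih _ (pvNodup_pvAInner rest d parent h)

theorem pvMem_bfold (rl : List Int) (d : PySem.Dict Int (List Int)) (later : PySem.Set Int)
    (k x : Int) :
    x ∈ ((rl.foldl pvBStep (d, later)).1).getD k [] ↔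
      x ∈ d.getD k [] ∨ pvContribR rl k x ∨ (k ∈ rl ∧ x ∈ later) := by
  induction rl generalizing d later with
  | nil => simp [pvContribR]
  | cons node rest ih =>
      show x ∈ ((rest.foldl pvBStep (pvBStep (d, later) node)).1).getD k [] ↔ _
      rw [ih]
      show x ∈ ((d.modify node [] (fun s => PySem.Set.union s later)).getD k []) ∨ _ ∨
        (k ∈ rest ∧ x ∈ PySem.Set.add later node) ↔
        _ ∨ ((x = node ∧ k ∈ rest) ∨ pvContribR rest k x) ∨ (k ∈ node :: rest ∧ x ∈ later)
      rw [PySem.Set.mem_add]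
      by_cases hk : k = node
      · subst hk
        rw [PySem.Dict.getD_modify_self, PySem.Set.mem_union]
        simp; tauto
      · rw [PySem.Dict.getD_modify_of_ne _ _ _ hk]
        simp [hk]; tauto

theorem pvNodup_bfold (rl : List Int) (d : PySem.Dict Int (List Int)) (later : PySem.Set Int)
    (h : ∀ k, ((d.getD k []) : List Int).Nodup) (k : Int) :
    (((rl.foldl pvBStep (d, later)).1).getD k []).Nodup := by
  induction rl generalizing d later with
  | nil => exact h k
  | cons node rest ih =>
      refine ih _ _ (fun u => ?_)
      by_cases hu : u = node
      · subst hu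
        rw [PySem.Dict.getD_modify_self]
        exact PySem.Set.nodup_union _ _ (h u)
      · rw [PySem.Dict.getD_modify_of_ne _ _ _ hu]; exact h u

theorem pvContribR_concat (rl : List Int) (h k x : Int) :
    pvContribR (rl ++ [h]) k x ↔ pvContribR rl k x ∨ (k = h ∧ x ∈ rl) := by
  induction rl with
  | nil => simp [pvContribR]
  | cons y t ih =>
      simp only [List.cons_append, pvContribR, ih, List.mem_append, List.mem_cons]
      tauto

theorem pvContrib_decomp (init : List Int) (last k x : Int) :
    pvContrib (init ++ [last]) k x ↔ pvContribR init.reverse k x ∨ (k ∈ init ∧ x = last) := by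
  induction init with
  | nil => simp [pvContrib, pvContribR]
  | cons h t ih =>
      simp only [List.cons_append, pvContrib, List.reverse_cons, pvContribR_concat, ih,
        List.mem_append, List.mem_cons, List.mem_reverse]
      tauto

theorem pvMem_pvBPath (p : List Int) (d : PySem.Dict Int (List Int)) (k x : Int) :
    x ∈ (pvBPath d p).getD k [] ↔ x ∈ d.getD k [] ∨ pvContrib p k x := by
  rcases List.eq_nil_or_concat p with rfl | ⟨init, last, rfl⟩
  · simp [pvBPath, pvContrib]
  · rw [List.concat_eq_append]
    show x ∈ (pvBPath d (init ++ [last])).getD k [] ↔ _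
    rw [pvBPath]
    rw [List.getLast?_concat]
    show x ∈ ((init ++ [last]).dropLast.reverse.foldl pvBStep
        (d, PySem.Set.add PySem.Set.empty last)).1.getD k [] ↔ _
    rw [List.dropLast_concat, pvMem_bfold, pvContrib_decomp]
    have hx : x ∈ PySem.Set.add PySem.Set.empty last ↔ x = last := by
      rw [PySem.Set.mem_add]; simp [PySem.Set.empty]
    rw [hx]
    simp

theorem pvNodup_pvBPath (p : List Int) (d : PySem.Dict Int (List Int))
    (h : ∀ k, ((d.getD k []) : List Int).Nodup) (k : Int) :
    ((pvBPath d p).getD k []).Nodup := by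
  rcases List.eq_nil_or_concat p with rfl | ⟨init, last, rfl⟩
  · exact h k
  · rw [List.concat_eq_append, pvBPath, List.getLast?_concat]
    exact pvNodup_bfold _ _ _ h k

theorem pvPaths_rel (paths : List (List Int)) (dA dB : PySem.Dict Int (List Int))
    (h : ∀ k x, x ∈ dA.getD k [] ↔ x ∈ dB.getD k []) (k x : Int) :
    x ∈ (paths.foldl pvAPath dA).getD k [] ↔ x ∈ (paths.foldl pvBPath dB).getD k [] := by
  induction paths generalizing dA dB with
  | nil => exact h k x
  | cons p rest ih =>
      refine ih _ _ (fun k x => ?_)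
      rw [pvMem_pvAPath, pvMem_pvBPath, h]

theorem pvNodup_paths_A (paths : List (List Int)) (d : PySem.Dict Int (List Int))
    (h : ∀ k, ((d.getD k []) : List Int).Nodup) (k : Int) :
    ((paths.foldl pvAPath d).getD k []).Nodup := by
  induction paths generalizing d with
  | nil => exact h k
  | cons p rest ih => exact ih _ (pvNodup_pvAPath p d h)

theorem pvNodup_paths_B (paths : List (List Int)) (d : PySem.Dict Int (List Int))
    (h : ∀ k, ((d.getD k []) : List Int).Nodup) (k : Int) :
    ((paths.foldl pvBPath d).getD k []).Nodup := by
  induction paths generalizing d with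
  | nil => exact h k
  | cons p rest ih => exact ih _ (pvNodup_pvBPath p d h)

theorem pvKeys_paths_A (paths : List (List Int)) (d : PySem.Dict Int (List Int))
    (h : ∀ p ∈ paths, ∀ e ∈ p.dropLast, e ∈ d.keys) :
    (paths.foldl pvAPath d).keys = d.keys := by
  induction paths generalizing d with
  | nil => rfl
  | cons p rest ih =>
      have hk := pvKeys_pvAPath p d (h p (by simp))
      rw [List.foldl_cons, ih _ (fun q hq e he => by rw [hk]; exact h q (by simp [hq]) e he), hk]

theorem pvValues_foldl_insert (l : List (Int × List Int)) (d : PySem.Dict Int (List Int))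
    (v : List Int) (hv : v ∈ (l.foldl (fun d p => d.insert p.1 p.2) d).values) :
    v ∈ d.values ∨ ∃ k, (k, v) ∈ l := by
  induction l generalizing d with
  | nil => exact Or.inl hv
  | cons p t ih =>
      rcases ih _ hv with h | ⟨k, hk⟩
      · rcases PySem.Dict.mem_values_insert _ _ _ _ h with rfl | h
        · exact Or.inr ⟨p.1, by simp⟩
        · exact Or.inl h
      · exact Or.inr ⟨k, by simp [hk]⟩

theorem pvValues_ofList (l : List (Int × List Int)) (v : List Int)
    (hv : v ∈ (PySem.Dict.ofList l).values) : ∃ k, (k, v) ∈ l := by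
  have h := pvValues_foldl_insert l PySem.Dict.empty v hv
  simpa [PySem.Dict.empty, PySem.Dict.values] using h

theorem pvFinal_getD_A (l : List Int) (d : PySem.Dict Int (List Int)) (v : Int)
    (hnd : l.Nodup) :
    ((l.foldl (fun d k => d.insert k (PySem.List.sorted (d.getD k []) (fun x => x))) d).getD v []) =
      if v ∈ l then PySem.List.sorted (d.getD v []) (fun x => x) else d.getD v [] := by
  induction l generalizing d with
  | nil => simp
  | cons h t ih =>
      have hnt : t.Nodup := hnd.of_cons
      have hht : h ∉ t := by simp at hnd; exact hnd.1
      rw [List.foldl_cons, ih _ hnt]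
      by_cases hv : v ∈ t
      · have hvh : v ≠ h := fun e => hht (e ▸ hv)
        simp [hv, hvh, PySem.Dict.getD_insert_of_ne _ _ _ hvh]
      · by_cases hvh : v = h
        · subst hvh
          simp [hv, PySem.Dict.getD_insert_self]
        · simp [hv, hvh, PySem.Dict.getD_insert_of_ne _ _ _ hvh]

theorem pvFinal_getD_B (l : List Int) (g : Int → List Int) (d : PySem.Dict Int (List Int)) (v : Int) :
    ((l.foldl (fun acc k => acc.insert k (g k)) d).getD v []) =
      if v ∈ l then g v else d.getD v [] := by
  induction l generalizing d with
  | nil => simp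
  | cons h t ih =>
      rw [List.foldl_cons, ih]
      by_cases hv : v ∈ t
      · simp [hv]
      · by_cases hvh : v = h
        · subst hvh; simp [hv, PySem.Dict.getD_insert_self]
        · simp [hv, hvh, PySem.Dict.getD_insert_of_ne _ _ _ hvh]

theorem pvFinal_keys_A (l : List Int) (d : PySem.Dict Int (List Int)) (hk : d.keys = l) :
    ((l.foldl (fun d k => d.insert k (PySem.List.sorted (d.getD k []) (fun x => x))) d).keys) = l := by
  have h := PySem.Dict.keys_foldl_insert (ν := List Int) l
      (fun d k => PySem.List.sorted (d.getD k []) (fun x => x)) d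
  rw [h, hk, pvSet_update_of_subset _ _ (fun x hx => hx)]

theorem pvFinal_keys_B (l : List Int) (g : Int → List Int) (hnd : l.Nodup) :
    ((l.foldl (fun acc k => acc.insert k (g k)) (PySem.Dict.empty : PySem.Dict Int (List Int))).keys) = l := by
  have h := PySem.Dict.keys_foldl_insert (ν := List Int) l (fun _ k => g k) PySem.Dict.empty
  rw [h]
  have h2 : PySem.Set.update ((PySem.Dict.empty : PySem.Dict Int (List Int)).keys) l
      = PySem.Set.ofList l := by rw [PySem.Set.ofList_eq_foldl]; rfl
  rw [h2, PySem.Set.ofList_eq_self_of_nodup _ hnd]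

theorem pvMain (paths : List (List Int)) (K : Int)
    (hparents : ∀ p ∈ paths, ∀ e ∈ p.dropLast, 0 ≤ e ∧ e < K) :
    ((PySem.List.pyRange 0 K).foldl
        (fun d k => d.insert k (PySem.List.sorted (d.getD k []) (fun x => x)))
        (paths.foldl pvAPath (pvInitDict K))).items =
      ((PySem.List.pyRange 0 K).foldl
        (fun acc k => acc.insert k
          (PySem.List.sorted ((paths.foldl pvBPath (pvInitDict K)).getD k []) (fun x => x)))
        PySem.Dict.empty).items := by
  have hd0get : ∀ v, (pvInitDict K).getD v [] = [] := fun v => pvInit_getD K v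
  have hd0keys : (pvInitDict K).keys = PySem.List.pyRange 0 K := pvInit_keys K
  have hnodR : (PySem.List.pyRange 0 K).Nodup := PySem.List.nodup_pyRange_one 0 K
  have hd0nd : ∀ k, (((pvInitDict K).getD k []) : List Int).Nodup := by
    intro k; rw [hd0get]; exact List.nodup_nil
  have hparents' : ∀ p ∈ paths, ∀ e ∈ p.dropLast, e ∈ (pvInitDict K).keys := by
    intro p hp e he
    rw [hd0keys, PySem.List.mem_pyRange_one]
    exact hparents p hp e he
  have hAkeys : (paths.foldl pvAPath (pvInitDict K)).keys = PySem.List.pyRange 0 K := by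
    rw [pvKeys_paths_A paths _ hparents', hd0keys]
  have hmem : ∀ k x, x ∈ (paths.foldl pvAPath (pvInitDict K)).getD k [] ↔
      x ∈ (paths.foldl pvBPath (pvInitDict K)).getD k [] :=
    fun k x => pvPaths_rel paths _ _ (fun _ _ => Iff.rfl) k x
  have hndA := pvNodup_paths_A paths _ hd0nd
  have hndB := pvNodup_paths_B paths _ hd0nd
  have hsorted : ∀ k, PySem.List.sorted ((paths.foldl pvAPath (pvInitDict K)).getD k []) (fun x => x)
      = PySem.List.sorted ((paths.foldl pvBPath (pvInitDict K)).getD k []) (fun x => x) := by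
    intro k
    refine PySem.List.sorted_eq_sorted_of_perm _ _ _ (fun a b h => h) ?_
    exact (List.perm_ext_iff_of_nodup (hndA k) (hndB k)).2 (fun a => hmem k a)
  have hfA := pvFinal_keys_A (PySem.List.pyRange 0 K) _ hAkeys
  have hfB := pvFinal_keys_B (PySem.List.pyRange 0 K)
      (fun k => PySem.List.sorted ((paths.foldl pvBPath (pvInitDict K)).getD k []) (fun x => x)) hnodR
  rw [PySem.Dict.items_eq_map_keys _ (by rw [hfA]; exact hnodR) ([] : List Int),
      PySem.Dict.items_eq_map_keys _ (by rw [hfB]; exact hnodR) ([] : List Int),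
      hfA, hfB]
  refine List.map_congr_left (fun k hk => ?_)
  rw [pvFinal_getD_A _ _ _ hnodR, pvFinal_getD_B]
  simp only [hk, if_true]
  exact congrArg (fun v => (k, v)) (hsorted k)

-- ===== VERDICT (by name: the statement is the Claim_ definition above) =====
theorem create_children_list_spec : Claim_equal_create_children_list := by
  intro th K _hdom hpre
  unfold Spec_create_children_list create_children_list create_children_list_alt
  cases th with
  | none => exact pvMain [] K (by simp)
  | some l =>
      refine pvMain ((PySem.Dict.ofList l).values) K ?_
      intro p hp e he
      obtain ⟨k, hkl⟩ := pvValues_ofList l p hp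
      exact hpre (k, p) (by simpa using hkl) e he
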